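-- pv_equiv track=rewrite | github.com/ehyeok9/2022-Digital-Logic-Design | source file/numof1.py | numof1
-- ===== SOURCE A (Python) =====
-- def numof1(answer, last_value):
--     lit = {}
--     for i in range(last_value+1):
--         temp = []
--         for j in answer:
--             if (j.count("1") == i):
--                 temp.append(j)
--         lit[i] = temp
--     return lit
-- ===== SOURCE B (Python) =====
-- def numof1(answer, last_value):
--     lit = {i: [] for i in range(last_value + 1)}
--     for j in answer:
--         c = j.count("1")
--         if c in lit:
--             lit[c].append(j)
--     return lit
-- ===== Notes on version B (the rewrite author's own statement) =====
-- stated objective: faster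
-- what changed: A rescans the whole answer list once per bucket index (last_value+1 passes); B precomputes all empty buckets, then counts each string once and appends it to its bucket in a single pass.
import Mathlib
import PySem

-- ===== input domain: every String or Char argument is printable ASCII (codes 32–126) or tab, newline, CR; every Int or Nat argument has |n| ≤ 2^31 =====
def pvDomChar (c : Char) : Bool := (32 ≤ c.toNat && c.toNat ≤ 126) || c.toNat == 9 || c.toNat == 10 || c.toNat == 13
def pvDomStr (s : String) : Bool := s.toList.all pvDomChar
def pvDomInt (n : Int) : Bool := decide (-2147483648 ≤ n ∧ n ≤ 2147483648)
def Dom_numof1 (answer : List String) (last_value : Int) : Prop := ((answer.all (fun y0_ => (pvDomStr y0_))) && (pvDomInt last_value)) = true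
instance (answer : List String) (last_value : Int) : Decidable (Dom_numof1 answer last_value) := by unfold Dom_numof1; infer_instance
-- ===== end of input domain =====

-- B replaces A's one-rescan-of-answer-per-bucket loop by precomputed empty buckets
-- plus a single counting pass over answer (faster in a timing run: asymptotic).


-- ===== PORT A =====
-- for i in range(last_value+1): temp = [append j when j.count("1") == i]; lit[i] = temp
def numof1 (answer : List String) (last_value : Int) : List (Int × List String) :=
  ((PySem.List.pyRange 0 (last_value + 1) 1).foldl
    (fun lit i =>
      lit.insert i (answer.foldl
        (fun temp j => if (PySem.Str.count j "1" : Int) == i then temp ++ [j] else temp) []))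
    PySem.Dict.empty).items

-- ===== PORT B =====
-- lit = {i: [] for i in range(last_value+1)}; for j in answer: c = j.count("1"); if c in lit: lit[c].append(j)
def numof1_alt (answer : List String) (last_value : Int) : List (Int × List String) :=
  (answer.foldl
    (fun d j =>
      let c : Int := PySem.Str.count j "1"
      if d.contains c then d.modify c [] (fun l => l ++ [j]) else d)
    ((PySem.List.pyRange 0 (last_value + 1) 1).foldl
      (fun d i => d.insert i ([] : List String)) PySem.Dict.empty)).items

-- ===== PRECONDITION & SPEC =====
def Spec_numof1 (answer : List String) (last_value : Int) (out : List (Int × List String)) : Prop := out = numof1_alt answer last_value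
instance (answer : List String) (last_value : Int) (out : List (Int × List String)) : Decidable (Spec_numof1 answer last_value out) := by unfold Spec_numof1; infer_instance

-- ===== CLAIM (what is proved, stated in full; the proofs are below) =====
def Claim_equal_numof1 : Prop := ∀ (answer : List String) (last_value : Int), Dom_numof1 answer last_value → Spec_numof1 answer last_value (numof1 answer last_value)

-- ===== LEMMAS AND PROOFS =====

-- A's result: one pair per i in range, value = the strings with exactly i ones.
theorem numof1_eq (answer : List String) (last_value : Int) :
    numof1 answer last_value =
      (PySem.List.pyRange 0 (last_value + 1) 1).map
        (fun i => (i, answer.filter (fun j => (PySem.Str.count j "1" : Int) == i))) := by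
  unfold numof1
  rw [PySem.Dict.items_foldl_insert_fresh (PySem.List.pyRange 0 (last_value + 1) 1)
        (fun i => i)
        (fun i => answer.foldl
          (fun temp j => if (PySem.Str.count j "1" : Int) == i then temp ++ [j] else temp) [])
        PySem.Dict.empty
        (by intro a _; exact PySem.Dict.contains_empty a)
        (by simpa using PySem.List.nodup_pyRange_one 0 (last_value + 1))]
  have hemp : (PySem.Dict.empty : PySem.Dict Int (List String)).items = [] := rfl
  rw [hemp, List.nil_append]
  simp only [PySem.List.foldl_append_if_eq_filter, List.nil_append]

-- B's initial dict: the keys in range order, every bucket empty.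
theorem lit0_items (last_value : Int) :
    ((PySem.List.pyRange 0 (last_value + 1) 1).foldl
        (fun d i => d.insert i ([] : List String)) PySem.Dict.empty).items =
      (PySem.List.pyRange 0 (last_value + 1) 1).map (fun i => (i, ([] : List String))) := by
  rw [PySem.Dict.items_foldl_insert_fresh (PySem.List.pyRange 0 (last_value + 1) 1)
        (fun i => i) (fun _ => ([] : List String)) PySem.Dict.empty
        (by intro a _; exact PySem.Dict.contains_empty a)
        (by simpa using PySem.List.nodup_pyRange_one 0 (last_value + 1))]
  have hemp : (PySem.Dict.empty : PySem.Dict Int (List String)).items = [] := rfl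
  rw [hemp, List.nil_append]

-- B's loop never changes the key list.
theorem keysB (l : List String) (d : PySem.Dict Int (List String)) :
    (l.foldl
      (fun d j =>
        let c : Int := PySem.Str.count j "1"
        if d.contains c then d.modify c [] (fun l => l ++ [j]) else d) d).keys = d.keys := by
  induction l generalizing d with
  | nil => rfl
  | cons j l ih =>
    simp only [List.foldl_cons]
    by_cases hc : d.contains ((PySem.Str.count j "1" : Int)) = true
    · rw [if_pos hc, ih, PySem.Dict.keys_modify,
        PySem.Dict.keys_insert_of_contains (h := hc)]
    · rw [if_neg hc, ih]

-- B's loop appends to bucket i exactly the strings with i ones (i an existing key).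
theorem getDB (l : List String) (d : PySem.Dict Int (List String)) (i : Int)
    (hi : d.contains i = true) :
    (l.foldl
      (fun d j =>
        let c : Int := PySem.Str.count j "1"
        if d.contains c then d.modify c [] (fun l => l ++ [j]) else d) d).getD i [] =
      d.getD i [] ++ l.filter (fun j => (PySem.Str.count j "1" : Int) == i) := by
  induction l generalizing d with
  | nil => simp
  | cons j l ih =>
    simp only [List.foldl_cons, List.filter_cons]
    by_cases hci : (PySem.Str.count j "1" : Int) = i
    · have hb : ((PySem.Str.count j "1" : Int) == i) = true := beq_iff_eq.mpr hci
      have hcc : d.contains ((PySem.Str.count j "1" : Int)) = true := by rw [hci]; exact hi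
      rw [if_pos hcc, ih _ (by rw [PySem.Dict.contains_modify]; simp [hi]), hb, hci,
        PySem.Dict.getD_modify_self]
      simp
    · have hb : ((PySem.Str.count j "1" : Int) == i) = false := beq_eq_false_iff_ne.mpr hci
      rw [hb]
      by_cases hcc : d.contains ((PySem.Str.count j "1" : Int)) = true
      · rw [if_pos hcc, ih _ (by rw [PySem.Dict.contains_modify]; simp [hi]),
          PySem.Dict.getD_modify_of_ne d [] (fun l => l ++ [j]) (fun h => hci (Eq.symm h)),
          if_neg Bool.false_ne_true]
      · rw [if_neg hcc, ih _ hi, if_neg Bool.false_ne_true]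

theorem numof1_alt_eq (answer : List String) (last_value : Int) :
    numof1_alt answer last_value =
      (PySem.List.pyRange 0 (last_value + 1) 1).map
        (fun i => (i, answer.filter (fun j => (PySem.Str.count j "1" : Int) == i))) := by
  unfold numof1_alt
  set ks := PySem.List.pyRange 0 (last_value + 1) 1 with hks
  set lit0 := ks.foldl (fun d i => d.insert i ([] : List String)) PySem.Dict.empty with hlit0
  have hitems : lit0.items = ks.map (fun i => (i, ([] : List String))) := lit0_items last_value
  have hkeys0 : lit0.keys = ks := by
    simp only [PySem.Dict.keys, hitems, List.map_map]
    have hid : ((fun x : Int × List String => x.1) ∘ fun i : Int => (i, ([] : List String))) = id := rfl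
    rw [hid, List.map_id]
  set dB := answer.foldl
      (fun d j =>
        let c : Int := PySem.Str.count j "1"
        if d.contains c then d.modify c [] (fun l => l ++ [j]) else d) lit0 with hdB
  have hkeysB : dB.keys = ks := by rw [hdB, keysB, hkeys0]
  have hnd : dB.keys.Nodup := by
    rw [hkeysB, hks]; exact PySem.List.nodup_pyRange_one 0 (last_value + 1)
  rw [PySem.Dict.items_eq_map_keys dB hnd [], hkeysB]
  apply List.map_congr_left
  intro i hi
  have hci : lit0.contains i = true := by
    rw [PySem.Dict.contains_iff_mem_keys, hkeys0]; exact hi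
  have hgd0 : lit0.getD i [] = [] := by
    apply PySem.Dict.getD_of_mem_items lit0 (v := ([] : List String))
    · rw [hitems]; exact List.mem_map.mpr ⟨i, hi, rfl⟩
    · rw [hkeys0, hks]; exact PySem.List.nodup_pyRange_one 0 (last_value + 1)
  rw [hdB, getDB answer lit0 i hci, hgd0]
  simp

-- ===== VERDICT (by name: the statement is the Claim_ definition above) =====
theorem numof1_spec : Claim_equal_numof1 := by
  intro answer last_value _
  unfold Spec_numof1
  rw [numof1_eq, numof1_alt_eq]
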